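-- pv_equiv track=rewrite | github.com/mithhu/DataStructure-Algorithms | DS and Algorithm/AlgoExpert/Medium/singleCycle.py | has_single_cycle
-- ===== SOURCE A (Python) =====
-- def has_single_cycle(array):
--     numOfElelmentVisited = 0
--     currentIndex = 0
--
--     while numOfElelmentVisited < len(array):
--         if currentIndex == 0 and numOfElelmentVisited > 0:
--             return False
--         numOfElelmentVisited += 1
--         currentIndex = getNextIndex(currentIndex, array)
--     return currentIndex == 0
--
-- def getNextIndex(currentIndex, array):
--     jump = array[currentIndex]
--     nextIdx = (currentIndex + jump) % len(array)
--     return nextIdx if nextIdx >= 0 else nextIdx + len(array)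
-- ===== SOURCE B (Python) =====
-- def has_single_cycle(array):
--     n = len(array)
--     if n == 0:
--         return True
--     visited = {0}
--     idx = 0
--     while len(visited) < n:
--         idx = (idx + array[idx]) % n
--         if idx in visited:
--             return False
--         visited.add(idx)
--     return (idx + array[idx]) % n == 0
-- ===== Notes on version B (the rewrite author's own statement) =====
-- stated objective: faster
-- what changed: B follows the jump orbit from index 0 maintaining a set of visited indices and returns False at the first revisited index, instead of A's jump counter with a premature-return-to-zero check; A always performs n jumps while B stops as soon as any index repeats.
import Mathlib
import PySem

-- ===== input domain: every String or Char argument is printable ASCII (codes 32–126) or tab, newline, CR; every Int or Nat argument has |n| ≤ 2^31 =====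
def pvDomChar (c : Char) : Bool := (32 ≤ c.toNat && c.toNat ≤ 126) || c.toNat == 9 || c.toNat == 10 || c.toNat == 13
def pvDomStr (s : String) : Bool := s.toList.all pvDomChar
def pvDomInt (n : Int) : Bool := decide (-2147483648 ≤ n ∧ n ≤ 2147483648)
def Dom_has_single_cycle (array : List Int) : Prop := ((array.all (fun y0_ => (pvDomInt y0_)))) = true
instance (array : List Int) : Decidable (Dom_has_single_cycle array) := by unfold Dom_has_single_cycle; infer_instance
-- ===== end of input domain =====

-- B re-implements the check by following the orbit with a visited set (stopping at the first
-- repeated index) instead of A's jump counter with a premature-return-to-zero check; same cost.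

-- ===== PORT A =====
-- array[currentIndex] is always in range on every state A reaches (currentIndex is 0 or a
-- result of `% len(array)` with len > 0), so the `.getD 0` default is unreachable.
def getNextIndex (currentIndex : Int) (array : List Int) : Int :=
  let jump := (PySem.List.pyGet? array currentIndex).getD 0
  let nextIdx := PySem.Int.mod (currentIndex + jump) (array.length : Int)
  if nextIdx ≥ 0 then nextIdx else nextIdx + (array.length : Int)

def hscLoopA (array : List Int) (numVisited : Nat) (currentIndex : Int) : Bool :=
  if _h : numVisited < array.length then
    if currentIndex = 0 ∧ 0 < numVisited then false
    else hscLoopA array (numVisited + 1) (getNextIndex currentIndex array)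
  else currentIndex == 0
termination_by array.length - numVisited

def has_single_cycle (array : List Int) : Bool := hscLoopA array 0 0

-- ===== PORT B =====
-- `(idx + array[idx]) % n` from Source B; as on A's side, the index is always in range when called.
def bStep (array : List Int) (idx : Int) : Int :=
  PySem.Int.mod (idx + (PySem.List.pyGet? array idx).getD 0) (array.length : Int)

def hscLoopB (array : List Int) (visited : PySem.Set Int) (idx : Int) : Bool :=
  if _h : visited.length < array.length then
    let nxt := bStep array idx
    if hm : PySem.Set.contains visited nxt then false
    else hscLoopB array (PySem.Set.add visited nxt) nxt
  else bStep array idx == 0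
termination_by array.length - visited.length
decreasing_by
  have hm' : ¬ bStep array idx ∈ visited := by
    simpa [PySem.Set.contains_iff] using hm
  have hl : (PySem.Set.add visited (bStep array idx)).length = visited.length + 1 := by
    rw [PySem.Set.add_of_not_mem hm']; simp
  omega

def has_single_cycle_alt (array : List Int) : Bool :=
  if array.length = 0 then true
  else hscLoopB array (PySem.Set.ofList [(0 : Int)]) 0

-- ===== PRECONDITION & SPEC =====
def Spec_has_single_cycle (array : List Int) (out : Bool) : Prop := out = has_single_cycle_alt array
instance (array : List Int) (out : Bool) : Decidable (Spec_has_single_cycle array out) := by unfold Spec_has_single_cycle; infer_instance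

-- ===== CLAIM (what is proved, stated in full; the proofs are below) =====
def Claim_equal_has_single_cycle : Prop := ∀ (array : List Int), Dom_has_single_cycle array → Spec_has_single_cycle array (has_single_cycle array)

-- ===== LEMMAS AND PROOFS =====

-- the jump orbit starting at index 0
def orbit (array : List Int) : Nat → Int
  | 0 => 0
  | k + 1 => getNextIndex (orbit array k) array

-- iterating getNextIndex from an arbitrary index
def iterStep (array : List Int) (idx : Int) : Nat → Int
  | 0 => idx
  | m + 1 => iterStep array (getNextIndex idx array) m

theorem iterStep_orbit (array : List Int) (k m : Nat) :
    iterStep array (orbit array k) m = orbit array (k + m) := by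
  induction m generalizing k with
  | zero => rfl
  | succ m ih =>
      have : getNextIndex (orbit array k) array = orbit array (k + 1) := rfl
      simp [iterStep, this, ih (k + 1)]
      ring_nf

theorem step_eq (array : List Int) (h : 0 < array.length) (i : Int) :
    getNextIndex i array = bStep array i := by
  unfold getNextIndex bStep
  have hpos : (0 : Int) < (array.length : Int) := by exact_mod_cast h
  have := PySem.Int.mod_nonneg (i + (PySem.List.pyGet? array i).getD 0) hpos
  simp [this]

theorem Afalse (array : List Int) (c : Nat) (idx : Int)
    (hlast : iterStep array idx (array.length - c) ≠ 0) :
    hscLoopA array c idx = false := by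
  unfold hscLoopA
  by_cases hc : c < array.length
  · simp only [hc, dif_pos]
    split_ifs with h0
    · rfl
    · apply Afalse array (c + 1) (getNextIndex idx array)
      have hrw : array.length - c = (array.length - (c + 1)) + 1 := by omega
      rw [hrw] at hlast
      exact hlast
  · simp only [hc]
    have h0 : array.length - c = 0 := by omega
    rw [h0] at hlast
    simpa [iterStep] using hlast
termination_by array.length - c

theorem orbit_per (array : List Int) (j p : Nat) (hp : orbit array (j + p) = orbit array j) :
    ∀ d, orbit array (j + p + d) = orbit array (j + d) := by
  intro d
  induction d with
  | zero => simpa using hp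
  | succ d ih =>
      have h1 : j + p + (d + 1) = (j + p + d) + 1 := by ring
      have h2 : j + (d + 1) = (j + d) + 1 := by ring
      rw [h1, h2]
      show getNextIndex (orbit array (j + p + d)) array = getNextIndex (orbit array (j + d)) array
      rw [ih]

theorem orbit_reduce (array : List Int) (j p : Nat) (hppos : 0 < p)
    (hp : orbit array (j + p) = orbit array j) (m : Nat) :
    orbit array (j + m) = orbit array (j + m % p) := by
  by_cases hm : m < p
  · rw [Nat.mod_eq_of_lt hm]
  · have hrw : j + m = j + p + (m - p) := by omega
    rw [hrw, orbit_per array j p hp (m - p), orbit_reduce array j p hppos hp (m - p)]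
    have : (m - p) % p = m % p := by
      conv_rhs => rw [← Nat.sub_add_cancel (by omega : p ≤ m)]
      rw [Nat.add_mod_right]
    rw [this]
termination_by m
decreasing_by omega

-- main loop correspondence: at step k, A's state is (k, orbit k) and B's state is
-- ({orbit 0, …, orbit k}, orbit k), with no premature return to 0 so far
theorem main_loop (array : List Int) (hn : 0 < array.length) (k : Nat) (hk : k < array.length)
    (s : PySem.Set Int)
    (hs : ∀ x, x ∈ s ↔ ∃ j ≤ k, x = orbit array j)
    (hlen : s.length = k + 1)
    (hnz : ∀ j, 1 ≤ j → j ≤ k → orbit array j ≠ 0) :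
    hscLoopA array k (orbit array k) = hscLoopB array s (orbit array k) := by
  have hAcond : ¬ (orbit array k = 0 ∧ 0 < k) := by
    rintro ⟨h0, hkpos⟩
    exact hnz k hkpos le_rfl h0
  have hstep : getNextIndex (orbit array k) array = orbit array (k + 1) := rfl
  have hbstep : bStep array (orbit array k) = orbit array (k + 1) := by
    rw [← step_eq array hn]; rfl
  by_cases hk1 : k + 1 < array.length
  · -- B's loop condition holds
    rw [hscLoopB.eq_def]
    simp only [hlen, hk1, dif_pos, hbstep]
    by_cases hmem : PySem.Set.contains s (orbit array (k + 1))
    · -- repeat found: B returns false; show A does too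
      simp only [hmem]
      have hmem' : orbit array (k + 1) ∈ s := (PySem.Set.contains_iff _ _).mp hmem
      obtain ⟨j, hj, hje⟩ := (hs _).mp hmem'
      rw [hscLoopA.eq_def]
      simp only [hk, dif_pos]
      rw [if_neg hAcond, hstep]
      by_cases h0 : orbit array (k + 1) = 0
      · -- next index is 0 again: A's premature check fires
        rw [hscLoopA.eq_def]
        simp only [hk1, dif_pos]
        rw [if_pos ⟨h0, by omega⟩]
      · -- a nonzero repeat: the orbit is trapped in a 0-free cycle, so A's final check fails
        have hj1 : 1 ≤ j := by
          rcases Nat.eq_zero_or_pos j with h | h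
          · exfalso; apply h0; rw [hje, h]; rfl
          · exact h
        apply Afalse
        rw [iterStep_orbit]
        have hform : (k + 1) + (array.length - (k + 1)) = array.length := by omega
        rw [hform]
        set p := k + 1 - j with hp
        have hppos : 0 < p := by omega
        have hper : orbit array (j + p) = orbit array j := by
          have : j + p = k + 1 := by omega
          rw [this, ← hje]
        have := orbit_reduce array j p hppos hper (array.length - j)
        have hform2 : j + (array.length - j) = array.length := by omega
        rw [hform2] at this
        rw [this]
        have hlt : (array.length - j) % p < p := Nat.mod_lt _ hppos
        exact hnz (j + (array.length - j) % p) (by omega) (by omega)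
    · -- new index: both loops advance
      simp only [hmem]
      have hmem' : orbit array (k + 1) ∉ s := by
        intro h; exact hmem ((PySem.Set.contains_iff _ _).mpr h)
      rw [hscLoopA.eq_def]
      simp only [hk, dif_pos]
      rw [if_neg hAcond, hstep]
      apply main_loop array hn (k + 1) hk1
      · intro x
        rw [PySem.Set.mem_add, hs]
        constructor
        · rintro (⟨j, hj, hje⟩ | he)
          · exact ⟨j, by omega, hje⟩
          · exact ⟨k + 1, le_rfl, he⟩
        · rintro ⟨j, hj, hje⟩
          rcases Nat.lt_or_ge j (k + 1) with h | h
          · exact Or.inl ⟨j, by omega, hje⟩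
          · have : j = k + 1 := by omega
            exact Or.inr (by rw [hje, this])
      · rw [PySem.Set.add_of_not_mem hmem']
        simp [hlen]
      · intro j h1 h2
        rcases Nat.lt_or_ge j (k + 1) with h | h
        · exact hnz j h1 (by omega)
        · have hj : j = k + 1 := by omega
          intro hc
          apply hmem'
          rw [hs]
          exact ⟨0, Nat.zero_le _, by rw [← hj, hc]; rfl⟩
  · -- visited covers all indices: both perform one last jump and compare with 0
    have hkeq : k + 1 = array.length := by omega
    rw [hscLoopB.eq_def]
    simp only [hlen, hk1]
    rw [hscLoopA.eq_def]
    simp only [hk, dif_pos]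
    rw [if_neg hAcond, hstep, hscLoopA.eq_def]
    simp [← hkeq, hbstep]
termination_by array.length - k

-- ===== VERDICT (by name: the statement is the Claim_ definition above) =====
theorem has_single_cycle_spec : Claim_equal_has_single_cycle := by
  intro array _
  unfold Spec_has_single_cycle has_single_cycle has_single_cycle_alt
  by_cases h0 : array.length = 0
  · rw [if_pos h0, hscLoopA]
    simp [h0]
  · rw [if_neg h0]
    have hn : 0 < array.length := Nat.pos_of_ne_zero h0
    have hmem0 : ∀ x, x ∈ PySem.Set.ofList [(0 : Int)] ↔ ∃ j ≤ 0, x = orbit array j := by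
      intro x
      constructor
      · intro hx
        have : x = 0 := by simpa [PySem.Set.ofList, PySem.Set.add, PySem.Set.empty] using hx
        exact ⟨0, le_rfl, by rw [this]; rfl⟩
      · rintro ⟨j, hj, hje⟩
        rw [Nat.le_zero] at hj
        subst hj
        simp [PySem.Set.ofList, PySem.Set.add, PySem.Set.empty, hje, orbit]
    have := main_loop array hn 0 hn (PySem.Set.ofList [(0 : Int)]) hmem0
      (by rfl) (by intro j h1 h2; omega)
    simpa [orbit] using this
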